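-- pv_equiv track=rewrite | github.com/jeongdonggi/baekjoonstudy | 프로그래머스/0/181890. 왼쪽 오른쪽/왼쪽 오른쪽.py | solution
-- ===== SOURCE A (Python) =====
-- def solution(str_list):
--     answer = []
--
--     for k, str in enumerate(str_list):
--         if str == 'l':
--             return str_list[:k]
--         elif str == 'r':
--             return str_list[k+1:]
--
--     return answer
-- ===== SOURCE B (Python) =====
-- def solution(str_list):
--     n = len(str_list)
--     pos_l = str_list.index('l') if 'l' in str_list else n
--     pos_r = str_list.index('r') if 'r' in str_list else n
--     if pos_l == n and pos_r == n:
--         return []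
--     if pos_l < pos_r:
--         return str_list[:pos_l]
--     return str_list[pos_r + 1:]
-- ===== Notes on version B (the rewrite author's own statement) =====
-- stated objective: alternative
-- what changed: Replaces the single early-exiting enumerate loop with an up-front computation of the first positions of 'l' and 'r' (sentinel = len) and a single comparison of those positions to pick the slice.
import Mathlib
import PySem

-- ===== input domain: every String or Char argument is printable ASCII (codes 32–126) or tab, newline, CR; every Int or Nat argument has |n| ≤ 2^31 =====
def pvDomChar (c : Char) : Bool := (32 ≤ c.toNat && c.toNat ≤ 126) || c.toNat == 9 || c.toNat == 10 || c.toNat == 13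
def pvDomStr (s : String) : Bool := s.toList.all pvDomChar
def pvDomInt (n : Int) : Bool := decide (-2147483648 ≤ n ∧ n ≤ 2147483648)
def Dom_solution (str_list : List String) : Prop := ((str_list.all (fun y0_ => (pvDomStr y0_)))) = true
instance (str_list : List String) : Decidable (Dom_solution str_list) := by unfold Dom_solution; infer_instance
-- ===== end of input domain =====

-- B computes the first positions of 'l' and 'r' up front (sentinel = length) and branches
-- on their comparison, instead of A's single early-exiting enumerate loop (objective: alternative).


-- ===== PORT A =====
-- the 'for k, str in enumerate(str_list)' loop: k is the running index, the list argument the remaining items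
def solLoop (orig : List String) : Nat → List String → List String
  | _, [] => []
  | k, s :: rest =>
    if s = "l" then PySem.List.slice orig none (some (k : Int))
    else if s = "r" then PySem.List.slice orig (some ((k : Int) + 1)) none
    else solLoop orig (k + 1) rest

def solution (str_list : List String) : List String :=
  solLoop str_list 0 str_list

-- ===== PORT B =====
def solution_alt (str_list : List String) : List String :=
  let n := str_list.length
  let posL := if "l" ∈ str_list then (PySem.List.index? str_list "l").getD n else n
  let posR := if "r" ∈ str_list then (PySem.List.index? str_list "r").getD n else n
  if posL = n ∧ posR = n then []
  else if posL < posR then PySem.List.slice str_list none (some (posL : Int))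
  else PySem.List.slice str_list (some ((posR : Int) + 1)) none

-- ===== PRECONDITION & SPEC =====
def Spec_solution (str_list : List String) (out : List String) : Prop := out = solution_alt str_list
instance (str_list : List String) (out : List String) : Decidable (Spec_solution str_list out) := by unfold Spec_solution; infer_instance

-- ===== CLAIM (what is proved, stated in full; the proofs are below) =====
def Claim_equal_solution : Prop := ∀ (str_list : List String), Dom_solution str_list → Spec_solution str_list (solution str_list)

-- ===== LEMMAS AND PROOFS =====

-- first position of v in xs, sentinel xs.length when absent
def pIdx (xs : List String) (v : String) : Nat := (PySem.List.index? xs v).getD xs.length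

-- the common value of both programs, expressed over xs alone
def F (xs : List String) : List String :=
  if pIdx xs "l" < pIdx xs "r" then xs.take (pIdx xs "l")
  else if pIdx xs "r" < xs.length then xs.drop (pIdx xs "r" + 1)
  else []

lemma pIdx_le (xs : List String) (v : String) : pIdx xs v ≤ xs.length := by
  unfold pIdx
  cases h : PySem.List.index? xs v with
  | none => simp
  | some k =>
    obtain ⟨hk, -, -⟩ := PySem.List.getElem_of_index?_eq_some h
    simpa using hk.le

lemma pIdx_cons_self (x : String) (xs : List String) : pIdx (x :: xs) x = 0 := by
  unfold pIdx
  rw [PySem.List.index?_cons_self]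
  rfl

lemma pIdx_cons_of_ne (x v : String) (xs : List String) (h : x ≠ v) :
    pIdx (x :: xs) v = pIdx xs v + 1 := by
  unfold pIdx
  rw [PySem.List.index?_cons_of_ne xs h]
  cases PySem.List.index? xs v <;> simp

lemma loop_eq (xs : List String) : ∀ (pre : List String),
    solLoop (pre ++ xs) pre.length xs = (if pIdx xs "l" < pIdx xs "r" then pre ++ xs.take (pIdx xs "l")
      else if pIdx xs "r" < xs.length then xs.drop (pIdx xs "r" + 1)
      else []) := by
  induction xs with
  | nil => intro pre; simp [solLoop, pIdx]
  | cons s rest ih =>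
    intro pre
    by_cases hl : s = "l"
    · subst hl
      have hL : pIdx ("l" :: rest) "l" = 0 := pIdx_cons_self _ _
      have hR : pIdx ("l" :: rest) "r" = pIdx rest "r" + 1 := pIdx_cons_of_ne _ _ _ (by decide)
      simp [solLoop, hL, hR, PySem.List.slice_to_natCast, List.take_left']
    · by_cases hr : s = "r"
      · subst hr
        have hR : pIdx ("r" :: rest) "r" = 0 := pIdx_cons_self _ _
        have hL : pIdx ("r" :: rest) "l" = pIdx rest "l" + 1 := pIdx_cons_of_ne _ _ _ (by decide)
        have hslice : PySem.List.slice (pre ++ "r" :: rest) (some ((pre.length : Int) + 1)) none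
            = rest := by
          have : ((pre.length : Int) + 1) = ((pre.length + 1 : Nat) : Int) := by push_cast; ring
          rw [this, PySem.List.slice_from_natCast]
          simp [List.drop_append]
        simp [solLoop, hL, hR, hl, hslice]
      · have hL : pIdx (s :: rest) "l" = pIdx rest "l" + 1 := pIdx_cons_of_ne _ _ _ hl
        have hR : pIdx (s :: rest) "r" = pIdx rest "r" + 1 := pIdx_cons_of_ne _ _ _ hr
        have harr : pre ++ s :: rest = (pre ++ [s]) ++ rest := by simp
        have hlen : pre.length + 1 = (pre ++ [s]).length := by simp
        have step : solLoop (pre ++ s :: rest) pre.length (s :: rest)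
            = solLoop ((pre ++ [s]) ++ rest) ((pre ++ [s]).length) rest := by
          rw [← harr, ← hlen]
          simp only [solLoop, if_neg hl, if_neg hr]
        rw [step, ih (pre ++ [s]), hL, hR]
        by_cases hc : pIdx rest "l" < pIdx rest "r"
        · simp [hc, List.take_succ_cons, List.append_assoc]
        · simp [hc, List.drop_succ_cons]

lemma solution_eq_F (xs : List String) : solution xs = F xs := by
  have := loop_eq xs []
  simpa [solution, F] using this

lemma alt_eq_F (xs : List String) : solution_alt xs = F xs := by
  simp only [solution_alt, F]
  have hposL : (if "l" ∈ xs then (PySem.List.index? xs "l").getD xs.length else xs.length)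
      = pIdx xs "l" := by
    by_cases h : "l" ∈ xs
    · simp [h, pIdx]
    · rw [if_neg h]
      unfold pIdx
      rw [(PySem.List.index?_eq_none_iff xs "l").2 h]
      rfl
  have hposR : (if "r" ∈ xs then (PySem.List.index? xs "r").getD xs.length else xs.length)
      = pIdx xs "r" := by
    by_cases h : "r" ∈ xs
    · simp [h, pIdx]
    · rw [if_neg h]
      unfold pIdx
      rw [(PySem.List.index?_eq_none_iff xs "r").2 h]
      rfl
  rw [hposL, hposR]
  have hLle := pIdx_le xs "l"
  have hRle := pIdx_le xs "r"
  by_cases hboth : pIdx xs "l" = xs.length ∧ pIdx xs "r" = xs.length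
  · have h1 : ¬ pIdx xs "l" < pIdx xs "r" := by omega
    have h2 : ¬ pIdx xs "r" < xs.length := by omega
    rw [if_pos hboth, if_neg h1, if_neg h2]
  · by_cases hc : pIdx xs "l" < pIdx xs "r"
    · rw [if_neg hboth, if_pos hc, if_pos hc, PySem.List.slice_to_natCast]
    · have h2 : pIdx xs "r" < xs.length := by omega
      have hcast : ((pIdx xs "r" : Int) + 1) = ((pIdx xs "r" + 1 : Nat) : Int) := by push_cast; ring
      rw [if_neg hboth, if_neg hc, if_neg hc, if_pos h2, hcast, PySem.List.slice_from_natCast]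

-- ===== VERDICT (by name: the statement is the Claim_ definition above) =====
theorem solution_spec : Claim_equal_solution := by
  intro xs _
  unfold Spec_solution
  rw [solution_eq_F, alt_eq_F]
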